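-- pv_equiv track=rewrite | github.com/nsmina914/alloy_surface_simulator | alloy_surface_simulator.py | distributionCalculator
-- ===== SOURCE A (Python) =====
-- def distributionCalculator(config, e1, e2):
--
--     '''
--     Given a binary alloy configuration (obtained from applying readability function to an .xyz file)
--     with elements e1 and e2, counts number of total atoms in bulk and on surface
--     as well as how many of the bulk atoms and how many of the surface atoms are each type of element.
--     '''
--
--     num_atoms=len(config)
--
--     bulk=0
--     surface=0
--     e1surface=0
--     e2surface=0
--     e1bulk=0
--     e2bulk=0
--
--     for line in config:
--         if line[3]=='12.0':
--             bulk+=1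
--             if line[1]==e1:
--                 e1bulk+=1
--             elif line[1]==e2:
--                 e2bulk+=1
--         else:
--             surface+=1
--             if line[1]==e1:
--                 e1surface+=1
--             elif line[1]==e2:
--                 e2surface+=1
--
--     return bulk, surface, e1surface, e2surface, e1bulk, e2bulk
-- ===== SOURCE B (Python) =====
-- def distributionCalculator(config, e1, e2):
--     bulk_elems = [line[1] for line in config if line[3] == '12.0']
--     surf_elems = [line[1] for line in config if line[3] != '12.0']
--     return (len(bulk_elems), len(surf_elems),
--             surf_elems.count(e1), surf_elems.count(e2),
--             bulk_elems.count(e1), bulk_elems.count(e2))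
-- ===== Notes on version B (the rewrite author's own statement) =====
-- stated objective: simpler
-- what changed: Replaces the six-counter accumulator loop by extracting the element column per bulk/surface group and using len/.count; Pre_ excludes lines shorter than 4 entries (A raises IndexError) and the degenerate call e1==e2, where A's elif leaves the e2 counters at 0 while B counts normally - both defensible for a 'binary alloy' counter.
import Mathlib
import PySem

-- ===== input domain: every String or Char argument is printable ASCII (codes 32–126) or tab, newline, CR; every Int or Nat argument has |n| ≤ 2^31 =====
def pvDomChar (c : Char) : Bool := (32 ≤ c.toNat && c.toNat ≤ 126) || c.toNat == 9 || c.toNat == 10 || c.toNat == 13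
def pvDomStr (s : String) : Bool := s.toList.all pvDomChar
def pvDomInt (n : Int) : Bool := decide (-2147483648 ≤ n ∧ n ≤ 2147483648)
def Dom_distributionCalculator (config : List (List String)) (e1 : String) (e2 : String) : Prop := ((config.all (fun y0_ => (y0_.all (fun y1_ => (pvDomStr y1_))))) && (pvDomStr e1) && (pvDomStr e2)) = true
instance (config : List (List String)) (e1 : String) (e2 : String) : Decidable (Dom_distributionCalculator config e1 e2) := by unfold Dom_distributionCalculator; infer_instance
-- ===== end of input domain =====

-- ===== PORT A =====
-- B: extracts the element column per bulk/surface group and uses len/.count (objective: simpler).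
-- helper: line[i] (Python raises IndexError when missing; Pre_ excludes short lines, so the default is never reached inside Pre_)
def pvGetA (line : List String) (i : Int) : String := (PySem.List.pyGet? line i).getD ""

-- the loop body of A, one step of the for-loop
def pvStepA (e1 e2 : String) (st : Int × Int × Int × Int × Int × Int) (line : List String) : Int × Int × Int × Int × Int × Int :=
  let (bulk, surface, e1surface, e2surface, e1bulk, e2bulk) := st
  if pvGetA line 3 = "12.0" then
    if pvGetA line 1 = e1 then (bulk + 1, surface, e1surface, e2surface, e1bulk + 1, e2bulk)
    else if pvGetA line 1 = e2 then (bulk + 1, surface, e1surface, e2surface, e1bulk, e2bulk + 1)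
    else (bulk + 1, surface, e1surface, e2surface, e1bulk, e2bulk)
  else
    if pvGetA line 1 = e1 then (bulk, surface + 1, e1surface + 1, e2surface, e1bulk, e2bulk)
    else if pvGetA line 1 = e2 then (bulk, surface + 1, e1surface, e2surface + 1, e1bulk, e2bulk)
    else (bulk, surface + 1, e1surface, e2surface, e1bulk, e2bulk)

def distributionCalculator (config : List (List String)) (e1 : String) (e2 : String) : Int × Int × Int × Int × Int × Int :=
  config.foldl (pvStepA e1 e2) (0, 0, 0, 0, 0, 0)

-- ===== PORT B =====
def pvGetB (line : List String) (i : Int) : String := (PySem.List.pyGet? line i).getD ""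

def distributionCalculator_alt (config : List (List String)) (e1 : String) (e2 : String) : Int × Int × Int × Int × Int × Int :=
  let bulkElems := (config.filter (fun line => pvGetB line 3 == "12.0")).map (fun line => pvGetB line 1)
  let surfElems := (config.filter (fun line => !(pvGetB line 3 == "12.0"))).map (fun line => pvGetB line 1)
  ((bulkElems.length : Int), (surfElems.length : Int),
   (surfElems.count e1 : Int), (surfElems.count e2 : Int),
   (bulkElems.count e1 : Int), (bulkElems.count e2 : Int))

-- ===== PRECONDITION & SPEC =====
-- Pre_: every line has at least 4 entries (else Python A raises IndexError on line[3]/line[1]),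
-- and e1 ≠ e2: on the degenerate call with equal elements A's elif leaves the e2 counters at 0
-- while B counts normally; either value is defensible for a binary-alloy counter, so it is excluded.
def Pre_distributionCalculator (config : List (List String)) (e1 : String) (e2 : String) : Prop :=
  (∀ line ∈ config, 4 ≤ line.length) ∧ e1 ≠ e2
instance (config : List (List String)) (e1 : String) (e2 : String) : Decidable (Pre_distributionCalculator config e1 e2) := by unfold Pre_distributionCalculator; infer_instance
def pvWitness_distributionCalculator : List (List String) × String × String :=
  ([["0", "Cu", "1.0", "12.0"], ["1", "Ag", "2.0", "9.0"]], "Cu", "Ag")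

def Spec_distributionCalculator (config : List (List String)) (e1 : String) (e2 : String) (out : Int × Int × Int × Int × Int × Int) : Prop := out = distributionCalculator_alt config e1 e2
instance (config : List (List String)) (e1 : String) (e2 : String) (out : Int × Int × Int × Int × Int × Int) : Decidable (Spec_distributionCalculator config e1 e2 out) := by unfold Spec_distributionCalculator; infer_instance

-- ===== CLAIM (what is proved, stated in full; the proofs are below) =====
def Claim_equal_distributionCalculator : Prop := ∀ (config : List (List String)) (e1 : String) (e2 : String), Dom_distributionCalculator config e1 e2 → Pre_distributionCalculator config e1 e2 → Spec_distributionCalculator config e1 e2 (distributionCalculator config e1 e2)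

-- ===== LEMMAS AND PROOFS =====
-- The fold of A, started from any accumulator, adds the six per-category counts componentwise.
theorem fold_counts (config : List (List String)) (e1 e2 : String)
    (b s x y u v : Int) :
    config.foldl (pvStepA e1 e2) (b, s, x, y, u, v)
    = (b + (config.countP (fun l => pvGetA l 3 == "12.0") : Int),
       s + (config.countP (fun l => !(pvGetA l 3 == "12.0")) : Int),
       x + (config.countP (fun l => !(pvGetA l 3 == "12.0") && pvGetA l 1 == e1) : Int),
       y + (config.countP (fun l => !(pvGetA l 3 == "12.0") && (!(pvGetA l 1 == e1) && pvGetA l 1 == e2)) : Int),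
       u + (config.countP (fun l => pvGetA l 3 == "12.0" && pvGetA l 1 == e1) : Int),
       v + (config.countP (fun l => pvGetA l 3 == "12.0" && (!(pvGetA l 1 == e1) && pvGetA l 1 == e2)) : Int)) := by
  induction config generalizing b s x y u v with
  | nil => simp
  | cons hd tl ih =>
    simp only [List.foldl_cons, List.countP_cons, pvStepA]
    rw [ih]
    by_cases h3 : pvGetA hd 3 = "12.0" <;>
      by_cases h1 : pvGetA hd 1 = e1 <;>
      by_cases h2 : pvGetA hd 1 = e2 <;>
      first
      | (have h21 : ¬(e2 = e1) := fun he => h1 (h2.trans he);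
         simp [h3, h2, h21, Prod.ext_iff] <;> omega)
      | (simp [h3, h1, h2, Prod.ext_iff] <;> omega)

theorem distributionCalculator_spec : Claim_equal_distributionCalculator := by
  intro config e1 e2 _ hpre
  show distributionCalculator config e1 e2 = distributionCalculator_alt config e1 e2
  obtain ⟨-, hne⟩ := hpre
  unfold distributionCalculator distributionCalculator_alt
  rw [fold_counts]
  simp only [List.count_eq_countP, List.countP_map, List.length_map,
    ← List.countP_eq_length_filter,
    List.countP_filter, Prod.mk.injEq, zero_add, Nat.cast_inj, Function.comp]
  refine ⟨rfl, rfl, ?_, ?_, ?_, ?_⟩ <;>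
    (apply List.countP_congr; intro l _;
     simp only [pvGetA, pvGetB];
     by_cases h3 : (PySem.List.pyGet? l 3).getD "" = "12.0" <;>
       by_cases h1 : (PySem.List.pyGet? l 1).getD "" = e1 <;>
       by_cases h2 : (PySem.List.pyGet? l 1).getD "" = e2 <;>
       first
       | exact absurd (h1.symm.trans h2) hne
       | simp [h3, h1, h2, hne, Ne.symm hne])
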